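-- pv_equiv track=rewrite | github.com/dancancer/txt2voice | apps/character-recognition/src/core/coreference.py | _extract_characters_in_sentence
-- ===== SOURCE A (Python) =====
-- from typing import List, Dict, Optional
--
-- def _extract_characters_in_sentence(
--
--     sentence: str,
--     alias_map: Dict[str, str]
-- ) -> List[str]:
--     """提取句子中的人物"""
--     characters = []
--
--     for alias, main_name in alias_map.items():
--         if alias in sentence:
--             if main_name not in characters:
--                 characters.append(main_name)
--
--     return characters
-- ===== SOURCE B (Python) =====
-- from typing import List, Dict
--
-- def _extract_characters_in_sentence(
--     sentence: str,
--     alias_map: Dict[str, str]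
-- ) -> List[str]:
--     # Recursive head-emit / tail-prune: no "seen" structure at all.
--     # When the head alias matches, emit its main name and drop every later
--     # pair carrying the same main name; duplicates can thus never arise.
--     def go(pairs):
--         if not pairs:
--             return []
--         (alias, main), rest = pairs[0], pairs[1:]
--         if alias in sentence:
--             return [main] + go([(a, m) for (a, m) in rest if m != main])
--         return go(rest)
--     return go(list(alias_map.items()))
-- ===== Notes on version B (the rewrite author's own statement) =====
-- stated objective: alternative
-- what changed: A's single fold with an online dedup (list-membership scan of the accumulated output per match) is replaced by a recursion with no seen-structure: on a match it emits the main name and prunes every later pair with that main name from the remaining list, so duplicates can never arise.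
import Mathlib
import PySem

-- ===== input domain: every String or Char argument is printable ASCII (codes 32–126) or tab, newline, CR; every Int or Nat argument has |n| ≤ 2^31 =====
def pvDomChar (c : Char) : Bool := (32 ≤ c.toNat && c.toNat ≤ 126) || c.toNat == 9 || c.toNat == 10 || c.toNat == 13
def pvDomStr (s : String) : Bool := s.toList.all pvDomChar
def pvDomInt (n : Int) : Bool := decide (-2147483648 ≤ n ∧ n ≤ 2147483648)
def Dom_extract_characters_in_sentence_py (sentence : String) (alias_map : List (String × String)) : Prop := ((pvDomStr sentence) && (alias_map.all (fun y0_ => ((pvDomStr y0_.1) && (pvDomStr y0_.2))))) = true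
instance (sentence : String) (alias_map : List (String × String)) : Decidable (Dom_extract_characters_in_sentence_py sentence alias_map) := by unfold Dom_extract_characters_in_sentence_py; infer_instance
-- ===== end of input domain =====

-- B: recursive head-emit/tail-prune (emit a matched main name, then filter it out of the remaining pairs) instead of A's fold with online dedup via a membership scan of the accumulator; alternative decomposition, same return value.


-- ===== PORT A =====
def extract_characters_in_sentence_py (sentence : String) (alias_map : List (String × String)) : List String :=
  alias_map.foldl
    (fun characters p =>
      if PySem.Str.isIn p.1 sentence then
        (if characters.contains p.2 then characters else characters ++ [p.2])
      else characters) []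

-- ===== PORT B =====
-- helper `go` of Source B: on a match, emit the head's main name and prune it from the rest
def pvGoB (sentence : String) : List (String × String) → List String
  | [] => []
  | p :: rest =>
    if PySem.Str.isIn p.1 sentence then
      p.2 :: pvGoB sentence (rest.filter (fun q => !(q.2 == p.2)))
    else pvGoB sentence rest
termination_by l => l.length
decreasing_by
  · calc (List.filter _ rest.attach).unattach.length
        ≤ rest.attach.length := by
          rw [List.length_unattach]; exact List.length_filter_le _ _
      _ < (p :: rest).length := by simp
  · simp

def extract_characters_in_sentence_py_alt (sentence : String) (alias_map : List (String × String)) : List String :=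
  pvGoB sentence alias_map

-- ===== PRECONDITION & SPEC =====
def Spec_extract_characters_in_sentence_py (sentence : String) (alias_map : List (String × String)) (out : List String) : Prop := out = extract_characters_in_sentence_py_alt sentence alias_map
instance (sentence : String) (alias_map : List (String × String)) (out : List String) : Decidable (Spec_extract_characters_in_sentence_py sentence alias_map out) := by unfold Spec_extract_characters_in_sentence_py; infer_instance

-- ===== CLAIM (what is proved, stated in full; the proofs are below) =====
def Claim_equal_extract_characters_in_sentence_py : Prop := ∀ (sentence : String) (alias_map : List (String × String)), Dom_extract_characters_in_sentence_py sentence alias_map → Spec_extract_characters_in_sentence_py sentence alias_map (extract_characters_in_sentence_py sentence alias_map)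

-- ===== LEMMAS AND PROOFS =====
-- unfolding equation for pvGoB on a cons cell (well-founded recursion hides it)
theorem pvGoB_cons (sentence : String) (p : String × String) (rest : List (String × String)) :
    pvGoB sentence (p :: rest) = if PySem.Str.isIn p.1 sentence then
      p.2 :: pvGoB sentence (rest.filter (fun q => !(q.2 == p.2)))
    else pvGoB sentence rest := by
  rw [pvGoB.eq_def]

-- Invariant: A's fold from accumulator `acc` equals `acc` followed by B's
-- recursion on the pairs whose main name is not already in `acc`.
theorem pv_fold_eq_go (sentence : String) (l : List (String × String)) :
    ∀ acc : List String,
      l.foldl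
        (fun characters p =>
          if PySem.Str.isIn p.1 sentence then
            (if characters.contains p.2 then characters else characters ++ [p.2])
          else characters) acc
      = acc ++ pvGoB sentence (l.filter (fun p => !(acc.contains p.2))) := by
  induction l with
  | nil => intro acc; simp [pvGoB]
  | cons p l ih =>
    intro acc
    rw [List.foldl_cons, List.filter_cons]
    by_cases hm : PySem.Str.isIn p.1 sentence
    · rw [if_pos hm]
      by_cases hc : acc.contains p.2
      · rw [if_pos hc, hc, ih]
        simp
      · rw [if_neg hc, ih (acc ++ [p.2])]
        have hc' : acc.contains p.2 = false := by simpa using hc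
        rw [hc']
        simp only [Bool.not_false]
        rw [if_pos trivial, pvGoB_cons, if_pos hm, List.filter_filter]
        rw [List.append_assoc]
        simp only [List.cons_append, List.nil_append]
        congr 2
        congr 1
        apply List.filter_congr
        intro q _
        rw [Bool.and_comm, beq_eq_decide, List.contains_append, Bool.not_or]
        simp
    · rw [if_neg hm, ih acc]
      by_cases hc : acc.contains p.2
      · rw [hc]; simp
      · have hc' : acc.contains p.2 = false := by simpa using hc
        rw [hc']
        simp only [Bool.not_false]
        rw [if_pos trivial, pvGoB_cons, if_neg hm]

-- ===== VERDICT (by name: the statement is the Claim_ definition above) =====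
theorem extract_characters_in_sentence_py_spec : Claim_equal_extract_characters_in_sentence_py := by
  intro sentence alias_map _
  unfold Spec_extract_characters_in_sentence_py
  unfold extract_characters_in_sentence_py extract_characters_in_sentence_py_alt
  rw [pv_fold_eq_go]
  simp
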